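-- pv_equiv track=rewrite | github.com/chomiestyle/DowJones_database | Sentiment_stocktwits.py | get_global_sentiment
-- ===== SOURCE A (Python) =====
-- def get_global_sentiment(list):
--     total_score=0
--     for s in list:
--         if s=='Bullish':
--             total_score=total_score+1
--         elif s=='Bearish':
--             total_score=total_score-1
--     return total_score
-- ===== SOURCE B (Python) =====
-- def get_global_sentiment(list):
--     return list.count('Bullish') - list.count('Bearish')
-- ===== Notes on version B (the rewrite author's own statement) =====
-- stated objective: idiomatic
-- what changed: Replaces the single-pass if/elif running total with two staged list.count scans, returning count('Bullish') - count('Bearish') with no accumulator or branching.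
import Mathlib
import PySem

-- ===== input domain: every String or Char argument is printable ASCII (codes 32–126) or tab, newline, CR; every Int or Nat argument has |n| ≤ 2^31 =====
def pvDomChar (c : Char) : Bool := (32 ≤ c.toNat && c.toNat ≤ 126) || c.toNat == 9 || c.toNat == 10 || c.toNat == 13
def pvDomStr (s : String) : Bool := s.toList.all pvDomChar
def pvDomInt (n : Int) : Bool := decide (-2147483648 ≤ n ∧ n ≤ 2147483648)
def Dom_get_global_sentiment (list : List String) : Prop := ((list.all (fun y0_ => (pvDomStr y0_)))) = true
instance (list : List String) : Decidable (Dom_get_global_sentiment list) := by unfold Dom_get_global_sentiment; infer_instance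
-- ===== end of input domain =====

-- B replaces A's single-pass if/elif running total with two staged list.count scans (idiomatic).


-- ===== PORT A =====
def get_global_sentiment (list : List String) : Int :=
  list.foldl (fun total_score s =>
    if s = "Bullish" then total_score + 1
    else if s = "Bearish" then total_score - 1
    else total_score) 0

-- ===== PORT B =====
def get_global_sentiment_alt (list : List String) : Int :=
  (PySem.List.count list "Bullish" : Int) - (PySem.List.count list "Bearish" : Int)

-- ===== PRECONDITION & SPEC =====
def Spec_get_global_sentiment (list : List String) (out : Int) : Prop := out = get_global_sentiment_alt list
instance (list : List String) (out : Int) : Decidable (Spec_get_global_sentiment list out) := by unfold Spec_get_global_sentiment; infer_instance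

-- ===== CLAIM =====
def Claim_equal_get_global_sentiment : Prop := ∀ (list : List String), Dom_get_global_sentiment list → Spec_get_global_sentiment list (get_global_sentiment list)

-- ===== LEMMAS AND PROOFS =====

-- A's fold computes (count "Bullish") − (count "Bearish"), shifted by the accumulator.
theorem get_global_sentiment_foldl (l : List String) (acc : Int) :
    l.foldl (fun total_score s =>
      if s = "Bullish" then total_score + 1
      else if s = "Bearish" then total_score - 1
      else total_score) acc
      = acc + (l.count "Bullish" : Int) - (l.count "Bearish" : Int) := by
  induction l generalizing acc with
  | nil => simp
  | cons x xs ih =>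
    simp only [List.foldl_cons, List.count_cons, ih]
    by_cases hx : x = "Bullish"
    · subst hx; simp; omega
    · by_cases hy : x = "Bearish"
      · subst hy; simp; omega
      · simp [hx, hy]

-- ===== VERDICT =====
theorem get_global_sentiment_spec : Claim_equal_get_global_sentiment := by
  intro list _
  unfold Spec_get_global_sentiment get_global_sentiment get_global_sentiment_alt
  simp [PySem.List.count_eq, get_global_sentiment_foldl]
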